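-- pv_equiv track=rewrite | github.com/hyunjinkim-developer/ProblemSolving | CodeTree/예술성/예술성.py | rotate_others
-- ===== SOURCE A (Python) =====
-- def rotate_others(others):
--
--     def rotate_clockwise_90_degree(matrix):
--         len_ = len(matrix)
--         result = [[0] * len_ for _ in range(len_)]
--
--         for r in range(len_):
--             for c in range(len_):
--                 result[c][len_ - 1 - r] = matrix[r][c]
--         return result
--
--     result_others = []
--     for i in range(4):
--         rotated_sub_paint = rotate_clockwise_90_degree(others[i])
--         result_others.append(rotated_sub_paint)
--     return result_others
-- ===== SOURCE B (Python) =====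
-- def rotate_others(others):
--     # Single top-down pass per submatrix: each row is folded into column
--     # accumulators by prepending its elements, so the columns grow bottom-up
--     # into the rotated rows; no preallocated grid, no n-1-r index arithmetic.
--     def rot(m):
--         n = len(m)
--         cols = [[] for _ in range(n)]
--         for row in m:
--             cols = [[row[c]] + cols[c] for c in range(n)]
--         return cols
--     return [rot(m) for m in others[:4]]
-- ===== Notes on version B (the rewrite author's own statement) =====
-- stated objective: alternative
-- what changed: Replaces the scatter-write rotation (preallocate an n x n zero grid, nested index loops assigning result[c][n-1-r]=m[r][c]) with a single top-down fold over the rows that prepends each row element-wise onto n column accumulators, so the rotated rows are built incrementally with no grid allocation and no n-1-r index arithmetic.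
import Mathlib
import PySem

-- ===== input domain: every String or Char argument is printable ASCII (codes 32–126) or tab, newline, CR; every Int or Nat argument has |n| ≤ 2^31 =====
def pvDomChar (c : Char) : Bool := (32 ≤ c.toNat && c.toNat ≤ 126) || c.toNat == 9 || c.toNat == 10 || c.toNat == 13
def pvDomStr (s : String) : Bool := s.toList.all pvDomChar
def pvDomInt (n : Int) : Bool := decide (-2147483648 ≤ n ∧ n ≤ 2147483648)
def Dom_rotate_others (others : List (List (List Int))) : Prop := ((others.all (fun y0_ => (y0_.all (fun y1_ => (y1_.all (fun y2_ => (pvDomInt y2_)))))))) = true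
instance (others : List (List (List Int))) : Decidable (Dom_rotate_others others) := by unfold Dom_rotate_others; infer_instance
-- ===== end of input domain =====

-- B replaces A's scatter-write rotation (preallocated n×n zero grid, nested index
-- loops assigning result[c][n-1-r]) with a single top-down fold over the rows that
-- prepends each row element-wise onto n column accumulators; same cost, different
-- decomposition.

-- ===== PORT A =====
-- result[c][n-1-r] = matrix[r][c]; indices are in range inside Pre_, so
-- List.getD / List.set are exact for Python's list indexing / item assignment.
def pvRotCW (matrix : List (List Int)) : List (List Int) :=
  let n := matrix.length
  let init := List.replicate n (List.replicate n (0 : Int))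
  (List.range n).foldl (fun res r =>
    (List.range n).foldl (fun res c =>
      res.set c ((res.getD c []).set (n - 1 - r) ((matrix.getD r []).getD c 0))) res) init

def rotate_others (others : List (List (List Int))) : List (List (List Int)) :=
  (List.range 4).foldl (fun acc i => acc ++ [pvRotCW (others.getD i [])]) []

-- ===== PORT B =====
-- row[c] is in range inside Pre_, so List.getD is exact for Python's row[c];
-- the list comprehension over range(n) is a map over List.range n.
def pvRotFold (m : List (List Int)) : List (List Int) :=
  m.foldl (fun cols row =>
      (List.range m.length).map (fun c => row.getD c 0 :: cols.getD c []))
    (List.replicate m.length [])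

def rotate_others_alt (others : List (List (List Int))) : List (List (List Int)) :=
  (others.take 4).map pvRotFold

-- ===== PRECONDITION & SPEC =====
-- Pre_ excludes exactly the inputs where Python A raises IndexError: fewer than 4
-- submatrices, or (among the first 4) a row shorter than its matrix's height.
def Pre_rotate_others (others : List (List (List Int))) : Prop :=
  4 ≤ others.length ∧ ∀ m ∈ others.take 4, ∀ row ∈ m, m.length ≤ row.length
instance (others : List (List (List Int))) : Decidable (Pre_rotate_others others) := by
  unfold Pre_rotate_others; infer_instance

def pvWitness_rotate_others : List (List (List Int)) :=
  [[[1, 2], [3, 4]], [[5]], [], [[0, 9], [7, 8]]]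

def Spec_rotate_others (others : List (List (List Int))) (out : List (List (List Int))) : Prop := out = rotate_others_alt others
instance (others : List (List (List Int))) (out : List (List (List Int))) : Decidable (Spec_rotate_others others out) := by unfold Spec_rotate_others; infer_instance

-- ===== CLAIM (what is proved, stated in full; the proofs are below) =====
def Claim_equal_rotate_others : Prop := ∀ (others : List (List (List Int))), Dom_rotate_others others → Pre_rotate_others others → Spec_rotate_others others (rotate_others others)

-- ===== LEMMAS AND PROOFS =====

-- the cell-write step of A's inner loop, named for the proofs
def pvStepC (m : List (List Int)) (n r : Nat) : List (List Int) → Nat → List (List Int) :=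
  fun res c => res.set c ((res.getD c []).set (n - 1 - r) ((m.getD r []).getD c 0))

def pvInit (n : Nat) : List (List Int) := List.replicate n (List.replicate n (0 : Int))

theorem pv_getD_set (l : List (List Int)) (i j : Nat) (a : List Int) :
    (l.set i a).getD j [] = if i = j ∧ i < l.length then a else l.getD j [] := by
  simp [List.getD, List.getElem?_set]
  split_ifs <;> simp_all <;> omega

theorem pv_getD_set_int (l : List Int) (i j : Nat) (a : Int) :
    (l.set i a).getD j 0 = if i = j ∧ i < l.length then a else l.getD j 0 := by
  simp [List.getD, List.getElem?_set]
  split_ifs <;> simp_all <;> omega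

-- inner loop of A: after the first t column writes of row pass r
theorem pv_inner (m : List (List Int)) (n r : Nat) :
    ∀ t : Nat, t ≤ n → ∀ res : List (List Int), res.length = n →
    ((List.range t).foldl (pvStepC m n r) res).length = n ∧
    ∀ c, ((List.range t).foldl (pvStepC m n r) res).getD c [] =
      if c < t then (res.getD c []).set (n - 1 - r) ((m.getD r []).getD c 0)
      else res.getD c [] := by
  intro t
  induction t with
  | zero => exact fun _ res h => ⟨h, fun c => by simp⟩
  | succ t ih =>
    intro ht res hlen
    obtain ⟨ihl, ihd⟩ := ih (by omega) res hlen
    rw [List.range_succ, List.foldl_append]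
    set Gt := (List.range t).foldl (pvStepC m n r) res with hG
    have hstep : [t].foldl (pvStepC m n r) Gt =
        Gt.set t ((Gt.getD t []).set (n - 1 - r) ((m.getD r []).getD t 0)) := rfl
    rw [hstep]
    refine ⟨by rw [List.length_set]; exact ihl, fun c => ?_⟩
    rw [pv_getD_set]
    by_cases hc : t = c
    · subst hc
      rw [if_pos ⟨rfl, by omega⟩, if_pos (by omega), ihd, if_neg (by omega)]
    · rw [if_neg (by tauto), ihd]
      by_cases h2 : c < t
      · rw [if_pos h2, if_pos (by omega)]
      · rw [if_neg h2, if_neg (by omega)]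

-- outer loop of A: after t full row passes, columns j ≥ n - t are filled
theorem pv_outer (m : List (List Int)) :
    ∀ t : Nat, t ≤ m.length →
    ((List.range t).foldl (fun res r => (List.range m.length).foldl (pvStepC m m.length r) res)
      (pvInit m.length)).length = m.length ∧
    ∀ c < m.length,
      ((((List.range t).foldl (fun res r => (List.range m.length).foldl (pvStepC m m.length r) res)
        (pvInit m.length)).getD c [])).length = m.length ∧
      ∀ j < m.length,
        (((List.range t).foldl (fun res r => (List.range m.length).foldl (pvStepC m m.length r) res)
          (pvInit m.length)).getD c []).getD j 0 =
          if m.length - t ≤ j then (m.getD (m.length - 1 - j) []).getD c 0 else 0 := by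
  intro t
  induction t with
  | zero =>
    intro _
    refine ⟨by simp [pvInit], fun c hc => ?_⟩
    have hrow : (pvInit m.length).getD c [] = List.replicate m.length (0 : Int) := by
      simp [pvInit, List.getD, hc]
    simp only [List.range_zero, List.foldl_nil]
    refine ⟨by rw [hrow]; simp, fun j hj => ?_⟩
    rw [hrow, if_neg (by omega)]
    simp [List.getD, hj]
  | succ t ih =>
    intro ht
    obtain ⟨ihl, ihd⟩ := ih (by omega)
    rw [List.range_succ, List.foldl_append]
    set Gt := (List.range t).foldl (fun res r => (List.range m.length).foldl (pvStepC m m.length r) res)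
      (pvInit m.length) with hG
    have hstep : [t].foldl (fun res r => (List.range m.length).foldl (pvStepC m m.length r) res) Gt =
        (List.range m.length).foldl (pvStepC m m.length t) Gt := rfl
    rw [hstep]
    obtain ⟨hFl, hFd⟩ := pv_inner m m.length t m.length le_rfl Gt ihl
    refine ⟨hFl, fun c hc => ?_⟩
    obtain ⟨hcl, hcd⟩ := ihd c hc
    rw [hFd c, if_pos hc]
    refine ⟨by rw [List.length_set]; exact hcl, fun j hj => ?_⟩
    rw [pv_getD_set_int]
    by_cases hk : m.length - 1 - t = j
    · subst hk
      rw [if_pos ⟨rfl, by omega⟩, if_pos (by omega)]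
      have h2 : m.length - 1 - (m.length - 1 - t) = t := by omega
      rw [h2]
    · rw [if_neg (by tauto), hcd j hj]
      by_cases h2 : m.length - t ≤ j
      · rw [if_pos h2, if_pos (by omega)]
      · rw [if_neg h2, if_neg (by omega)]

-- A's rotation equals the gather formula: row c is column c read bottom-to-top
theorem pvRotCW_eq (m : List (List Int)) :
    pvRotCW m = (List.range m.length).map (fun c => m.reverse.map (fun row => row.getD c 0)) := by
  have hA : pvRotCW m = (List.range m.length).foldl
      (fun res r => (List.range m.length).foldl (pvStepC m m.length r) res) (pvInit m.length) := rfl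
  obtain ⟨hl, hd⟩ := pv_outer m m.length le_rfl
  rw [hA]
  set G := (List.range m.length).foldl
      (fun res r => (List.range m.length).foldl (pvStepC m m.length r) res) (pvInit m.length) with hG
  apply List.ext_getElem
  · simp [hl]
  · intro c h1 h2
    have hc : c < m.length := by rw [hl] at h1; exact h1
    obtain ⟨hcl, hcd⟩ := hd c hc
    have hrow : G.getD c [] = G[c] := List.getD_eq_getElem G [] h1
    rw [hrow] at hcl hcd
    have hrhs : ((List.range m.length).map (fun c => m.reverse.map (fun row => row.getD c 0)))[c]'h2
        = m.reverse.map (fun row => row.getD c 0) := by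
      simp
    rw [hrhs]
    apply List.ext_getElem
    · simp [hcl]
    · intro j hj1 hj2
      have hjn : j < m.length := by rw [hcl] at hj1; exact hj1
      have hv := hcd j hjn
      rw [if_pos (by omega), List.getD_eq_getElem _ _ hj1] at hv
      rw [hv]
      have hjr : j < m.reverse.length := by simpa using hjn
      rw [List.getElem_map, List.getElem_reverse]
      rw [List.getD_eq_getElem m [] (show m.length - 1 - j < m.length by omega)]

-- B's fold: prepending t rows onto column accumulators gathers them in reverse
theorem pv_fold (n : Nat) (rows : List (List Int)) :
    ∀ cols : List (List Int), cols.length = n →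
    rows.foldl (fun cols row => (List.range n).map (fun c => row.getD c 0 :: cols.getD c [])) cols
      = (List.range n).map (fun c => rows.reverse.map (fun row => row.getD c 0) ++ cols.getD c []) := by
  induction rows with
  | nil =>
    intro cols hlen
    simp only [List.foldl_nil, List.reverse_nil, List.map_nil, List.nil_append]
    apply List.ext_getElem
    · simp [hlen]
    · intro i h1 h2
      simp [List.getD, List.getElem?_eq_getElem h1]
  | cons r rs ih =>
    intro cols hlen
    rw [List.foldl_cons, ih _ (by simp)]
    apply List.map_congr_left
    intro c hc
    have hcn : c < n := List.mem_range.mp hc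
    have hmid : ((List.range n).map (fun c => r.getD c 0 :: cols.getD c [])).getD c []
        = r.getD c 0 :: cols.getD c [] := by
      rw [List.getD_eq_getElem _ [] (by simpa using hcn)]
      simp
    rw [hmid]
    simp

-- B's rotation equals the same gather formula
theorem pvRotFold_eq (m : List (List Int)) :
    pvRotFold m = (List.range m.length).map (fun c => m.reverse.map (fun row => row.getD c 0)) := by
  unfold pvRotFold
  rw [pv_fold m.length m (List.replicate m.length []) (by simp)]
  apply List.map_congr_left
  intro c hc
  have hcn : c < m.length := List.mem_range.mp hc
  simp [List.getD, hcn]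

-- ===== VERDICT (by name: the statement is the Claim_ definition above) =====
theorem rotate_others_spec : Claim_equal_rotate_others := by
  intro others _ hpre
  obtain ⟨hlen, _⟩ := hpre
  unfold Spec_rotate_others rotate_others rotate_others_alt
  match others, hlen with
  | a :: b :: c :: d :: rest, _ =>
    simp [List.range_succ, pvRotCW_eq, pvRotFold_eq, List.getD]
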